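-- pv_equiv track=rewrite | github.com/FabriceCh/inf8808-projet | data/dataGenerator.py | unit_lifetimes_to_unit_counts
-- ===== SOURCE A (Python) =====
-- def lifetime_list_to_unit_counts(lifetime_list, duration):
--     born_time = 0
--     died_time = 1
--     counts = []
--     for i in range(duration):
--         count = 0
--         for u in lifetime_list:
--             if u[born_time] <= i < u[died_time]:
--                 count += 1;
--         counts.append(count)
--
--     return counts
--
-- def unit_lifetimes_to_unit_counts(unit_lifetimes, duration):
--     unit_counts = {}
--     for unit in unit_lifetimes:
--         lifetime_list = unit_lifetimes[unit]
--         counts = lifetime_list_to_unit_counts(lifetime_list, duration)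
--         unit_counts[unit] = counts
--
--     # return unit_counts
--
--     return {unit: lifetime_list_to_unit_counts(unit_lifetimes[unit], duration)
--             for unit in unit_lifetimes}
-- ===== SOURCE B (Python) =====
-- def unit_lifetimes_to_unit_counts(unit_lifetimes, duration):
--     if duration <= 0:
--         return {unit: [] for unit in unit_lifetimes}
--     n = duration
--     result = {}
--     for unit, lifetimes in unit_lifetimes.items():
--         diff = [0] * (n + 1)
--         for u in lifetimes:
--             lo = max(u[0], 0)
--             hi = min(u[1], n)
--             if lo < hi:
--                 diff[lo] += 1
--                 diff[hi] -= 1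
--         counts = []
--         c = 0
--         for d in diff[:n]:
--             c += d
--             counts.append(c)
--         result[unit] = counts
--     return result
-- ===== Notes on version B (the rewrite author's own statement) =====
-- stated objective: faster
-- what changed: A rescans every lifetime entry for each of the duration timesteps; B builds a per-unit difference array (+1 at the clamped born index, -1 at the clamped died index) and takes one prefix-sum pass.
-- outside the precondition, e.g. on unit_lifetimes_to_unit_counts({'u': [[5]]}, 3): A returns {'u': [0, 0, 0]}, B raises IndexError
import Mathlib
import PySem

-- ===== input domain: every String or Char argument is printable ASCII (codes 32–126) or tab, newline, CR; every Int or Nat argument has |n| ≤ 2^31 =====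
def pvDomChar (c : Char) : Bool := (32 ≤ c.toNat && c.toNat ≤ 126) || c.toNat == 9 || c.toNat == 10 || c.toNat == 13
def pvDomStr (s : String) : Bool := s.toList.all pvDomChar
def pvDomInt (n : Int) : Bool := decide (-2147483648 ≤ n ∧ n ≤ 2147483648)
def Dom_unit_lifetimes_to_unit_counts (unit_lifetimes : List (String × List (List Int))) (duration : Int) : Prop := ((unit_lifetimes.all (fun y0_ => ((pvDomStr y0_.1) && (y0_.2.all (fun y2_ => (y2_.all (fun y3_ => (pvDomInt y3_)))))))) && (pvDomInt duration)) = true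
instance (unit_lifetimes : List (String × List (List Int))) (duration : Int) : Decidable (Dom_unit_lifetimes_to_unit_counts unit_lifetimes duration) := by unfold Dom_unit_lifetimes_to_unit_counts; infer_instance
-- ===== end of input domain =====

-- B replaces A's per-timestep rescan of all lifetimes by a per-unit difference array (+1 at born, -1 at died, then prefix sum).

-- ===== PORT A =====
-- lifetime_list_to_unit_counts: for each i in range(duration), count entries u with u[0] <= i < u[1].
-- u[0]/u[1] are ported as pyGetD with default 0: Pre_ guarantees every entry has length ≥ 2
-- whenever duration > 0, so the default is never consulted on admitted inputs.
def pvA_cnt (lifetime_list : List (List Int)) (duration : Int) : List Int :=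
  (PySem.List.pyRange 0 duration 1).foldl
    (fun counts i =>
      counts ++ [lifetime_list.foldl
        (fun count u =>
          if PySem.List.pyGetD u 0 0 ≤ i ∧ i < PySem.List.pyGetD u 1 0 then count + 1
          else count) 0]) []

-- A's first loop builds a dict the function never returns (dead code in the Python);
-- the returned value is the dict comprehension, ported here: iterate the keys, look each up.
def unit_lifetimes_to_unit_counts (unit_lifetimes : List (String × List (List Int))) (duration : Int) : List (String × List Int) :=
  ((PySem.Dict.mk unit_lifetimes).keys.foldl
    (fun d unit =>
      d.insert unit (pvA_cnt ((PySem.Dict.mk unit_lifetimes).getD unit []) duration))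
    PySem.Dict.empty).items

-- ===== PORT B =====
-- body of B's inner loop: diff[lo] += 1; diff[hi] -= 1 (only when lo < hi)
def pvB_step (n : Nat) (diff : List Int) (u : List Int) : List Int :=
  let lo := max (PySem.List.pyGetD u 0 0) 0
  let hi := min (PySem.List.pyGetD u 1 0) (n : Int)
  if lo < hi then
    let diff1 := diff.set lo.toNat (diff.getD lo.toNat 0 + 1)
    diff1.set hi.toNat (diff1.getD hi.toNat 0 - 1)
  else diff

def pvB_diff (lifetimes : List (List Int)) (n : Nat) : List Int :=
  lifetimes.foldl (pvB_step n) (List.replicate (n + 1) 0)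

-- the prefix-sum loop over diff[:n]
def pvB_counts (lifetimes : List (List Int)) (n : Nat) : List Int :=
  (((pvB_diff lifetimes n).take n).foldl
    (fun (st : List Int × Int) d => (st.1 ++ [st.2 + d], st.2 + d)) ([], 0)).1

def unit_lifetimes_to_unit_counts_alt (unit_lifetimes : List (String × List (List Int))) (duration : Int) : List (String × List Int) :=
  if duration ≤ 0 then unit_lifetimes.map (fun p => (p.1, ([] : List Int)))
  else unit_lifetimes.map (fun p => (p.1, pvB_counts p.2 duration.toNat))

-- ===== PRECONDITION & SPEC =====
-- Pre_ excludes (a) inputs with duration > 0 where some lifetime entry is shorter than 2 (a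
-- malformed [born, died] pair): there Python A raises IndexError except in the accidental
-- short-circuit case u[0] ≥ duration (where A returns all-zero counts) while B's u[1] access
-- raises — and (b) association lists with duplicate unit keys, which cannot arise from a Python dict.
def Pre_unit_lifetimes_to_unit_counts (unit_lifetimes : List (String × List (List Int))) (duration : Int) : Prop :=
  (0 < duration → ∀ p ∈ unit_lifetimes, ∀ u ∈ p.2, 2 ≤ u.length) ∧
  (unit_lifetimes.map Prod.fst).Nodup
instance (unit_lifetimes : List (String × List (List Int))) (duration : Int) : Decidable (Pre_unit_lifetimes_to_unit_counts unit_lifetimes duration) := by unfold Pre_unit_lifetimes_to_unit_counts; infer_instance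

def pvWitness_unit_lifetimes_to_unit_counts : (List (String × List (List Int))) × Int :=
  ([("u", [[0, 2], [1, 3]]), ("v", [[-1, 1]])], 3)

def Spec_unit_lifetimes_to_unit_counts (unit_lifetimes : List (String × List (List Int))) (duration : Int) (out : List (String × List Int)) : Prop := out = unit_lifetimes_to_unit_counts_alt unit_lifetimes duration
instance (unit_lifetimes : List (String × List (List Int))) (duration : Int) (out : List (String × List Int)) : Decidable (Spec_unit_lifetimes_to_unit_counts unit_lifetimes duration out) := by unfold Spec_unit_lifetimes_to_unit_counts; infer_instance

-- ===== CLAIM (what is proved, stated in full; the proofs are below) =====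
def Claim_equal_unit_lifetimes_to_unit_counts : Prop := ∀ (unit_lifetimes : List (String × List (List Int))) (duration : Int), Dom_unit_lifetimes_to_unit_counts unit_lifetimes duration → Pre_unit_lifetimes_to_unit_counts unit_lifetimes duration → Spec_unit_lifetimes_to_unit_counts unit_lifetimes duration (unit_lifetimes_to_unit_counts unit_lifetimes duration)

-- ===== LEMMAS AND PROOFS =====

-- A's per-timestep count, elementwise
theorem pvA_cnt_eq (L : List (List Int)) (d : Int) :
    pvA_cnt L d = (PySem.List.pyRange 0 d 1).map
      (fun i => (L.countP (fun u => decide (PySem.List.pyGetD u 0 0 ≤ i ∧ i < PySem.List.pyGetD u 1 0)) : Int)) := by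
  unfold pvA_cnt
  rw [PySem.List.foldl_append_singleton_eq_map]
  simp [PySem.List.foldl_ite_add_one]

-- sum of a prefix after a single in-range list update
theorem sum_take_set (l : List Int) (j k : Nat) (v : Int) (hj : j < l.length) :
    ((l.set j v).take k).sum = (l.take k).sum + (if j < k then v - l.getD j 0 else 0) := by
  induction l generalizing j k with
  | nil => simp at hj
  | cons a t ih =>
    cases j with
    | zero =>
      cases k with
      | zero => simp
      | succ k => simp [List.take_succ_cons]; ring
    | succ j =>
      cases k with
      | zero => simp
      | succ k =>
        have hj' : j < t.length := by simpa using hj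
        simp only [List.set_cons_succ, List.take_succ_cons, List.sum_cons, List.getD_cons_succ,
          Nat.add_lt_add_iff_right, ih j k hj']
        split_ifs <;> ring

theorem pvB_step_length (n : Nat) (diff : List Int) (u : List Int) :
    (pvB_step n diff u).length = diff.length := by
  simp only [pvB_step]
  split <;> simp

theorem foldl_step_length (n : Nat) (L : List (List Int)) :
    ∀ diff : List Int, (L.foldl (pvB_step n) diff).length = diff.length := by
  induction L with
  | nil => intro diff; simp
  | cons u t ih => intro diff; rw [List.foldl_cons, ih, pvB_step_length]

theorem pvB_diff_length (L : List (List Int)) (n : Nat) : (pvB_diff L n).length = n + 1 := by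
  unfold pvB_diff
  rw [foldl_step_length]
  simp

theorem sum_take_step (n k : Nat) (_hk : k ≤ n) (diff : List Int) (hlen : diff.length = n + 1)
    (u : List Int) :
    ((pvB_step n diff u).take k).sum = (diff.take k).sum +
      (if max (PySem.List.pyGetD u 0 0) 0 < (k : Int) ∧
          (k : Int) ≤ min (PySem.List.pyGetD u 1 0) (n : Int) then (1 : Int) else 0) := by
  have hlo0 : (0 : Int) ≤ max (PySem.List.pyGetD u 0 0) 0 := le_max_right _ _
  have hhin : min (PySem.List.pyGetD u 1 0) (n : Int) ≤ (n : Int) := min_le_right _ _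
  by_cases hlt : max (PySem.List.pyGetD u 0 0) 0 < min (PySem.List.pyGetD u 1 0) (n : Int)
  · have hloN : (max (PySem.List.pyGetD u 0 0) 0).toNat < diff.length := by rw [hlen]; omega
    have hhiN : (min (PySem.List.pyGetD u 1 0) (n : Int)).toNat <
        (diff.set (max (PySem.List.pyGetD u 0 0) 0).toNat
          (diff.getD (max (PySem.List.pyGetD u 0 0) 0).toNat 0 + 1)).length := by
      rw [List.length_set, hlen]; omega
    simp only [pvB_step, if_pos hlt]
    rw [sum_take_set _ _ k _ hhiN, sum_take_set diff _ k _ hloN]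
    split_ifs <;> omega
  · simp only [pvB_step, if_neg hlt]
    have hp : ¬(max (PySem.List.pyGetD u 0 0) 0 < (k : Int) ∧
        (k : Int) ≤ min (PySem.List.pyGetD u 1 0) (n : Int)) := by omega
    rw [if_neg hp]
    ring

theorem pvB_diff_fold_sum (n k : Nat) (hk : k ≤ n) (L : List (List Int)) :
    ∀ (diff : List Int), diff.length = n + 1 →
      ((L.foldl (pvB_step n) diff).take k).sum = (diff.take k).sum +
        (L.countP (fun u => decide (max (PySem.List.pyGetD u 0 0) 0 < (k : Int) ∧
          (k : Int) ≤ min (PySem.List.pyGetD u 1 0) (n : Int))) : Int) := by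
  induction L with
  | nil => intro diff _; simp
  | cons u t ih =>
    intro diff hlen
    rw [List.foldl_cons, ih _ (by rw [pvB_step_length, hlen]),
      sum_take_step n k hk diff hlen u]
    simp only [List.countP_cons, decide_eq_true_eq]
    push_cast
    ring

theorem pvB_diff_take_sum (L : List (List Int)) (n k : Nat) (hk : k ≤ n) :
    ((pvB_diff L n).take k).sum =
      (L.countP (fun u => decide (max (PySem.List.pyGetD u 0 0) 0 < (k : Int) ∧
        (k : Int) ≤ min (PySem.List.pyGetD u 1 0) (n : Int))) : Int) := by
  unfold pvB_diff
  rw [pvB_diff_fold_sum n k hk L (List.replicate (n + 1) 0) (by simp)]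
  simp [List.take_replicate]

-- the prefix-sum loop produces the running sums
theorem prefix_loop (l : List Int) (acc : List Int) (c : Int) :
    (l.foldl (fun (st : List Int × Int) d => (st.1 ++ [st.2 + d], st.2 + d)) (acc, c)).1 =
      acc ++ (List.range l.length).map (fun i => c + (l.take (i + 1)).sum) := by
  induction l generalizing acc c with
  | nil => simp
  | cons d t ih =>
    simp only [List.foldl_cons, ih, List.length_cons, List.range_succ_eq_map, List.map_cons,
      List.map_map]
    simp [Function.comp, List.take_succ_cons, add_assoc]

theorem pvB_counts_eq (L : List (List Int)) (n : Nat) :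
    pvB_counts L n = (List.range n).map
      (fun (i : Nat) => (L.countP (fun u => decide (PySem.List.pyGetD u 0 0 ≤ (i : Int) ∧
        (i : Int) < min (PySem.List.pyGetD u 1 0) (n : Int))) : Int)) := by
  unfold pvB_counts
  rw [prefix_loop]
  have hlen : ((pvB_diff L n).take n).length = n := by
    simp [pvB_diff_length]
  rw [hlen]
  simp only [List.nil_append, zero_add]
  apply List.map_congr_left
  intro i hi
  have hi' : i < n := List.mem_range.mp hi
  have h1 : (((pvB_diff L n).take n).take (i + 1)) = (pvB_diff L n).take (i + 1) := by
    rw [List.take_take]; congr 1; omega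
  rw [h1, pvB_diff_take_sum L n (i + 1) (by omega)]
  congr 1
  apply List.countP_congr
  intro u _
  simp only [decide_eq_true_eq]
  push_cast
  omega

-- the two per-unit computations agree
theorem per_unit_eq (L : List (List Int)) (d : Int) :
    pvA_cnt L d = pvB_counts L d.toNat := by
  rw [pvA_cnt_eq, pvB_counts_eq, PySem.List.pyRange_one]
  have hn : (d - 0).toNat = d.toNat := by omega
  rw [hn, List.map_map]
  apply List.map_congr_left
  intro k hk
  have hk' : k < d.toNat := List.mem_range.mp hk
  simp only [Function.comp_apply, zero_add]
  congr 1
  apply List.countP_congr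
  intro u _
  have hkd : (k : Int) < (d.toNat : Int) := by exact_mod_cast hk'
  simp only [decide_eq_true_eq]
  omega

-- A's per-unit count is empty for non-positive duration
theorem pvA_cnt_nonpos (L : List (List Int)) (d : Int) (hd : d ≤ 0) : pvA_cnt L d = [] := by
  unfold pvA_cnt
  rw [PySem.List.pyRange_one_eq_nil hd]
  rfl

-- ===== VERDICT (by name: the statement is the Claim_ definition above) =====
theorem unit_lifetimes_to_unit_counts_spec : Claim_equal_unit_lifetimes_to_unit_counts := by
  intro ul duration _ hpre
  unfold Spec_unit_lifetimes_to_unit_counts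
  unfold unit_lifetimes_to_unit_counts unit_lifetimes_to_unit_counts_alt
  obtain ⟨-, hnd⟩ := hpre
  have hkeys : (PySem.Dict.mk ul).keys = ul.map Prod.fst := PySem.Dict.keys_mk ul
  have hnodup : (PySem.Dict.mk ul).keys.Nodup := by rw [hkeys]; exact hnd
  have hfresh := PySem.Dict.items_foldl_insert_fresh
    (l := (PySem.Dict.mk ul).keys) (k := fun a => a)
    (v := fun a => pvA_cnt ((PySem.Dict.mk ul).getD a []) duration)
    (d := PySem.Dict.empty)
    (by intro a _; simp [PySem.Dict.contains_empty])
    (by simpa [hkeys] using hnd)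
  rw [hfresh]
  simp only [PySem.Dict.empty, List.nil_append, hkeys, List.map_map]
  by_cases hd : duration ≤ 0
  · rw [if_pos hd]
    apply List.map_congr_left
    intro p hp
    simp only [Function.comp_apply]
    rw [pvA_cnt_nonpos _ _ hd]
  · rw [if_neg hd]
    apply List.map_congr_left
    intro p hp
    simp only [Function.comp_apply]
    have hmem : (p.1, p.2) ∈ (PySem.Dict.mk ul).items := by
      show (p.1, p.2) ∈ ul
      simpa using hp
    rw [PySem.Dict.getD_of_mem_items _ hmem hnodup, per_unit_eq]
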